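-- pv_equiv track=rewrite | github.com/brainpalstekk/python-sentence-translator | translator.py | realTranslate
-- ===== SOURCE A (Python) =====
-- EtoF = {'bread': 'du pain', 'meat': 'du vin',\
-- 'eats': 'mange', 'drinks': 'bois',\
-- 'likes': 'aime', 1: 'un',\
-- '6.00':'6.00'}
--
-- def wordTranslator(key, dictionary):
--     if key in dictionary:
--         return dictionary[key]
--     else:
--         return key
--
-- def realTranslate(sentence):
--     msg ="Does not Suggest Violence: "
--     numberFound = 0
--     translator =''
--     key =''
--     for c in sentence:
--         if c!=' ':
--             key = key + c
--         else:
--             translator = translator + ' ' + wordTranslator(key, EtoF)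
--             key = '' ##Set the key again to empty
--             numberFound+=1
--     if(numberFound>0):
--         return msg + "\n" + translator[1:] + ' ' + wordTranslator(key, EtoF)
--     else:
--         return "Does not Suggest Violence: " + "\n" + translator[1:] + ' ' + wordTranslator(key, EtoF)
-- ===== SOURCE B (Python) =====
-- EtoF = {'bread': 'du pain', 'meat': 'du vin',\
-- 'eats': 'mange', 'drinks': 'bois',\
-- 'likes': 'aime', 1: 'un',\
-- '6.00':'6.00'}
--
-- def wordTranslator(key, dictionary):
--     if key in dictionary:
--         return dictionary[key]
--     else:
--         return key
--
-- def realTranslate(sentence):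
--     trans = [wordTranslator(w, EtoF) for w in sentence.split(' ')]
--     return "Does not Suggest Violence: \n" + ' '.join(trans[:-1]) + ' ' + trans[-1]
-- ===== Notes on version B (the rewrite author's own statement) =====
-- stated objective: idiomatic
-- what changed: Replaces the character-by-character accumulation loop (and its dead numberFound branch) with str.split on the space separator, a per-word translation comprehension, and one join-based expression.
import Mathlib
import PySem

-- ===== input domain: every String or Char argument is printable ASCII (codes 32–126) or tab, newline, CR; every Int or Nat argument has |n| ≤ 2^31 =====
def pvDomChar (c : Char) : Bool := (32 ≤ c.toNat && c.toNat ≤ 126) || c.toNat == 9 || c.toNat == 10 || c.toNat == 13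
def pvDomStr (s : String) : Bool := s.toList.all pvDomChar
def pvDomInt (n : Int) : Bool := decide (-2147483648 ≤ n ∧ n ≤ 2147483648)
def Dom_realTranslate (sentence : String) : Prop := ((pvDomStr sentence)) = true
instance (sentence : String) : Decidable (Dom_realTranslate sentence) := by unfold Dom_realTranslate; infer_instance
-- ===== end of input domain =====

-- B replaces A's character-by-character accumulation loop (and its dead numberFound branch)
-- with split(' ') + a per-word translation comprehension + one join expression (idiomatic).

-- ===== PORT A =====
-- Python's EtoF also has one int key (1: 'un'); lookups here are always by a str key, which in
-- Python never compares equal to an int key, so that entry is unreachable and omitted here.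
def EtoF : PySem.Dict String String :=
  PySem.Dict.mk [("bread", "du pain"), ("meat", "du vin"), ("eats", "mange"),
   ("drinks", "bois"), ("likes", "aime"), ("6.00", "6.00")]

def wordTranslator (key : String) (dictionary : PySem.Dict String String) : String :=
  match PySem.Dict.get? dictionary key with
  | some v => v
  | none => key

-- strings are carried as List Char (PySem convention); Python str '+' is List.append here
def realTranslate (sentence : String) : String :=
  let msg : List Char := "Does not Suggest Violence: ".toList
  let st : List Char × List Char × Int := sentence.toList.foldl
    (fun acc c =>
      if c ≠ ' ' then (acc.1, acc.2.1 ++ [c], acc.2.2)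
      else (acc.1 ++ ' ' :: (wordTranslator (String.ofList acc.2.1) EtoF).toList, [], acc.2.2 + 1))
    ([], [], 0)
  if st.2.2 > 0 then
    String.ofList (msg ++ '\n' :: PySem.Chars.slice st.1 (some 1) none
      ++ ' ' :: (wordTranslator (String.ofList st.2.1) EtoF).toList)
  else
    String.ofList ("Does not Suggest Violence: ".toList ++ '\n' :: PySem.Chars.slice st.1 (some 1) none
      ++ ' ' :: (wordTranslator (String.ofList st.2.1) EtoF).toList)

-- ===== PORT B =====
def realTranslate_alt (sentence : String) : String :=
  let trans : List (List Char) :=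
    (PySem.Chars.splitOn sentence.toList [' ']).map
      (fun w => (wordTranslator (String.ofList w) EtoF).toList)
  -- trans[-1]: str.split(' ') always returns a nonempty list, so pyGet? is some; getD's
  -- default is unreachable (no Python raise is being replaced by a value)
  String.ofList ("Does not Suggest Violence: \n".toList
    ++ PySem.Chars.join [' '] (PySem.List.slice trans none (some (-1)))
    ++ ' ' :: ((PySem.List.pyGet? trans (-1)).getD []))

-- ===== PRECONDITION & SPEC =====
def Spec_realTranslate (sentence : String) (out : String) : Prop := out = realTranslate_alt sentence
instance (sentence : String) (out : String) : Decidable (Spec_realTranslate sentence out) := by unfold Spec_realTranslate; infer_instance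

-- ===== CLAIM (what is proved, stated in full; the proofs are below) =====
def Claim_equal_realTranslate : Prop := ∀ (sentence : String), Dom_realTranslate sentence → Spec_realTranslate sentence (realTranslate sentence)

-- ===== LEMMAS AND PROOFS =====

-- the words of cs split on ' ', with k the partial word already read (A's `key`)
def pvW (k : List Char) : List Char → List (List Char)
  | [] => [k]
  | c :: r => if c = ' ' then k :: pvW [] r else pvW (k ++ [c]) r

def pvWt (w : List Char) : List Char := (wordTranslator (String.ofList w) EtoF).toList

-- A's `translator` contribution while consuming cs with partial word k
def pvT (k : List Char) : List Char → List Char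
  | [] => []
  | c :: r => if c = ' ' then (' ' :: pvWt k) ++ pvT [] r else pvT (k ++ [c]) r

-- A's final `key` after consuming cs with partial word k
def pvL (k : List Char) : List Char → List Char
  | [] => k
  | c :: r => if c = ' ' then pvL [] r else pvL (k ++ [c]) r

theorem pvW_ne_nil (k cs : List Char) : pvW k cs ≠ [] := by
  induction cs generalizing k with
  | nil => simp [pvW]
  | cons c r ih => by_cases h : c = ' ' <;> simp [pvW, h, ih]

theorem pvSplitOn_go (fuel : Nat) :
    ∀ (l cur : List Char) (acc : List (List Char)), l.length ≤ fuel →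
      PySem.Chars.splitOn.go [' '] fuel l cur acc = acc.reverse ++ pvW cur.reverse l := by
  induction fuel with
  | zero =>
    intro l cur acc h
    have : l = [] := by cases l <;> simp_all
    subst this
    simp [PySem.Chars.splitOn.go, pvW]
  | succ f ih =>
    intro l cur acc h
    cases l with
    | nil => simp [PySem.Chars.splitOn.go, pvW]
    | cons c rest =>
      by_cases hc : c = ' '
      · subst hc
        simp only [PySem.Chars.splitOn.go]
        rw [if_pos (by simp [List.isPrefixOf])]
        have hd : List.drop [' '].length (' ' :: rest) = rest := by simp
        rw [hd, ih rest [] (cur.reverse :: acc) (by simpa using h)]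
        simp [pvW]
      · simp only [PySem.Chars.splitOn.go]
        rw [if_neg (by simp [List.isPrefixOf]; exact Ne.symm hc)]
        rw [ih rest (c :: cur) acc (by simpa using Nat.le_of_succ_le_succ h)]
        simp [pvW, hc]

theorem pvSplitOn_eq (s : List Char) : PySem.Chars.splitOn s [' '] = pvW [] s := by
  have := pvSplitOn_go (s.length + 1) s [] [] (by omega)
  simpa [PySem.Chars.splitOn] using this

theorem pvT_eq (k cs : List Char) :
    pvT k cs = ((pvW k cs).dropLast).flatMap (fun w => ' ' :: pvWt w) := by
  induction cs generalizing k with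
  | nil => simp [pvT, pvW]
  | cons c r ih =>
    by_cases h : c = ' '
    · subst h
      simp only [pvT, pvW, reduceIte]
      rw [List.dropLast_cons_of_ne_nil (pvW_ne_nil [] r)]
      simp [ih]
    · simp [pvT, pvW, h, ih]

theorem pvL_eq (k cs : List Char) : some (pvL k cs) = (pvW k cs).getLast? := by
  induction cs generalizing k with
  | nil => simp [pvL, pvW]
  | cons c r ih =>
    by_cases h : c = ' '
    · subst h
      simp only [pvL, pvW, reduceIte]
      rw [ih]
      cases hW : pvW [] r with
      | nil => exact absurd hW (pvW_ne_nil [] r)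
      | cons x xs => simp
    · simp [pvL, pvW, h, ih]

-- invariant of A's fold: translator accumulates pvT, key ends as pvL (numberFound untracked:
-- both result branches are identical strings)
theorem pvFoldA (cs : List Char) :
    ∀ (t k : List Char) (n : Int),
      (cs.foldl
        (fun (acc : List Char × List Char × Int) c =>
          if c ≠ ' ' then (acc.1, acc.2.1 ++ [c], acc.2.2)
          else (acc.1 ++ ' ' :: (wordTranslator (String.ofList acc.2.1) EtoF).toList, [], acc.2.2 + 1))
        (t, k, n)).1 = t ++ pvT k cs ∧
      (cs.foldl
        (fun (acc : List Char × List Char × Int) c =>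
          if c ≠ ' ' then (acc.1, acc.2.1 ++ [c], acc.2.2)
          else (acc.1 ++ ' ' :: (wordTranslator (String.ofList acc.2.1) EtoF).toList, [], acc.2.2 + 1))
        (t, k, n)).2.1 = pvL k cs := by
  induction cs with
  | nil => intro t k n; simp [pvT, pvL]
  | cons c r ih =>
    intro t k n
    by_cases h : c = ' '
    · subst h
      simpa [pvT, pvL, pvWt] using ih (t ++ ' ' :: (wordTranslator (String.ofList k) EtoF).toList) [] (n + 1)
    · simpa [pvT, pvL, h] using ih t (k ++ [c]) n

-- dropping the leading separator of a ' '-prefixed flatMap gives the ' '-join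
theorem pvDrop_flatMap (ws : List (List Char)) :
    (ws.flatMap (fun w => ' ' :: pvWt w)).drop 1 = List.intercalate [' '] (ws.map pvWt) := by
  induction ws with
  | nil => simp [List.intercalate]
  | cons w ws ih =>
    cases ws with
    | nil => simp [List.intercalate]
    | cons w2 ws2 =>
      have hstep : List.intercalate [' '] (pvWt w :: pvWt w2 :: ws2.map pvWt)
          = pvWt w ++ [' '] ++ List.intercalate [' '] (pvWt w2 :: ws2.map pvWt) := by
        simp [List.intercalate, List.intersperse]
      simp only [List.flatMap_cons, List.map_cons] at *
      rw [hstep, ← ih]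
      simp

theorem realTranslate_eq (s : List Char) :
    realTranslate (String.ofList s) = realTranslate_alt (String.ofList s) := by
  unfold realTranslate realTranslate_alt
  simp only [String.toList_ofList]
  obtain ⟨h1, h2⟩ := pvFoldA s [] [] 0
  rw [pvSplitOn_eq]
  have hlast : (pvW [] s).getLast? = some (pvL [] s) := (pvL_eq [] s).symm
  have hget : (PySem.List.pyGet? ((pvW [] s).map (fun w => (wordTranslator (String.ofList w) EtoF).toList)) (-1)).getD []
      = pvWt (pvL [] s) := by
    rw [show (PySem.List.pyGet? ((pvW [] s).map (fun w => (wordTranslator (String.ofList w) EtoF).toList)) (-1))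
        = ((pvW [] s).map (fun w => (wordTranslator (String.ofList w) EtoF).toList)).getLast? from by
      simp [pysem]]
    rw [List.getLast?_map, hlast]
    rfl
  have hslice : PySem.List.slice ((pvW [] s).map (fun w => (wordTranslator (String.ofList w) EtoF).toList)) none (some (-1))
      = ((pvW [] s).dropLast).map (fun w => (wordTranslator (String.ofList w) EtoF).toList) := by
    simp [pysem, List.map_dropLast]
  rw [hslice, hget]
  -- reduce A's branches (identical) and translator[1:]
  split <;>
  · apply congrArg String.ofList
    rw [h1, h2]
    simp only [PySem.Chars.slice_eq_listSlice, PySem.List.slice_from _ (by norm_num : (0:Int) ≤ 1),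
      List.nil_append]
    rw [pvT_eq, show ((1:Int).toNat) = 1 from rfl, pvDrop_flatMap]
    have : "Does not Suggest Violence: \n".toList
        = "Does not Suggest Violence: ".toList ++ ['\n'] := by decide
    simp [this, pvWt]
    rfl

-- ===== VERDICT (by name: the statement is the Claim_ definition above) =====
theorem realTranslate_spec : Claim_equal_realTranslate := by
  intro sentence _
  unfold Spec_realTranslate
  have := realTranslate_eq sentence.toList
  simpa using this
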